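-- pv_equiv track=rewrite | github.com/djeada/Personal-Website | scripts/strip_comments.py | strip_js_comments
-- ===== SOURCE A (Python) =====
-- def strip_js_comments(content: str) -> str:
--     """
--     Strips comments from JavaScript code while preserving strings and regex.
--     """
--     result = []
--     i = 0
--     length = len(content)
--
--     while i < length:
--         if i + 1 < length and content[i:i+2] == '//':
--             while i < length and content[i] != '\n':
--                 i += 1
--             if i < length:
--                 result.append('\n')
--                 i += 1
--             continue
--
--         if i + 1 < length and content[i:i+2] == '/*':
--             i += 2
--             while i + 1 <= length and content[i:i+2] != '*/':
--                 i += 1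
--             if i + 1 <= length:
--                 i += 2
--             continue
--
--         if content[i] in ('"', "'"):
--             delimiter = content[i]
--             result.append(content[i])
--             i += 1
--             while i < length:
--                 if content[i] == '\\' and i + 1 < length:
--                     result.append(content[i])
--                     result.append(content[i + 1])
--                     i += 2
--                     continue
--                 result.append(content[i])
--                 if content[i] == delimiter:
--                     i += 1
--                     break
--                 i += 1
--             continue
--
--         if content[i] == '`':
--             result.append(content[i])
--             i += 1
--             while i < length:
--                 if content[i] == '\\' and i + 1 < length:
--                     result.append(content[i])
--                     result.append(content[i + 1])
--                     i += 2
--                     continue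
--                 result.append(content[i])
--                 if content[i] == '`':
--                     i += 1
--                     break
--                 i += 1
--             continue
--
--         result.append(content[i])
--         i += 1
--
--     return ''.join(result)
-- ===== SOURCE B (Python) =====
-- def strip_js_comments(content: str) -> str:
--     NORMAL, LINE, BLOCK, STRING = 0, 1, 2, 3
--     out = []
--     state = NORMAL
--     delim = ''
--     escaped = False
--     star = False
--     i = 0
--     n = len(content)
--     while i < n:
--         c = content[i]
--         if state == NORMAL:
--             if c == '/' and i + 1 < n and content[i + 1] == '/':
--                 state = LINE
--                 i += 2
--                 continue
--             if c == '/' and i + 1 < n and content[i + 1] == '*':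
--                 state = BLOCK
--                 star = False
--                 i += 2
--                 continue
--             if c in ('"', "'", '`'):
--                 state = STRING
--                 delim = c
--                 escaped = False
--             out.append(c)
--         elif state == LINE:
--             if c == '\n':
--                 out.append('\n')
--                 state = NORMAL
--         elif state == BLOCK:
--             if c == '/' and star:
--                 state = NORMAL
--             star = (c == '*')
--         else:
--             out.append(c)
--             if escaped:
--                 escaped = False
--             elif c == '\\':
--                 escaped = True
--             elif c == delim:
--                 state = NORMAL
--         i += 1
--     return ''.join(out)
-- ===== Notes on version B (the rewrite author's own statement) =====
-- stated objective: alternative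
-- what changed: Replaced A's nested consume-loops (separate inner while-loops for line comments, block comments, strings and templates) by a flat single-pass DFA: one loop advancing one character at a time with an explicit state variable plus escaped/star flags.
import Mathlib
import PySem

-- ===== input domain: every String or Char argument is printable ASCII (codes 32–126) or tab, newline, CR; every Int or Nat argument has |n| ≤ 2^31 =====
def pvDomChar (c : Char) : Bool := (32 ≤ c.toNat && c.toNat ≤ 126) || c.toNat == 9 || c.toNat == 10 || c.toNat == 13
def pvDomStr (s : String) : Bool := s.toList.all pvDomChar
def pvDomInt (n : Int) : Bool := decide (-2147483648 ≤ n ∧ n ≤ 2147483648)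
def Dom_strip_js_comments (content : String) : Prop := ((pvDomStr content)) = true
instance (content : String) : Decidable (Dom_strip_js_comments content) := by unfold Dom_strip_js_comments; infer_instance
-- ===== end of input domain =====

-- B replaces A's nested consume-loops by one flat state-machine pass; objective: alternative (same cost, different structure).

-- ===== PORT A =====
-- A's outer while-loop with its four inner consume-loops, as mutual recursion on the
-- remaining suffix of the input (the suffix represents index i; result is accumulated
-- by consing, exactly the chars A appends, in order).
mutual
  -- the outer `while i < length` loop
  def pvStripA : List Char → List Char
    | [] => []
    | c :: rest =>
      if c = '/' ∧ rest.head? = some '/' then pvLineA rest.tail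
      else if c = '/' ∧ rest.head? = some '*' then pvBlockA rest.tail
      else if c = '"' ∨ c = '\'' then c :: pvStrA c rest
      else if c = '`' then c :: pvStrA '`' rest
      else c :: pvStripA rest
  termination_by cs => cs.length
  decreasing_by all_goals (simp only [List.length_tail, List.length_cons]; omega)
  -- inner loop of the `//` branch: skip to '\n', emit it if present
  def pvLineA : List Char → List Char
    | [] => []
    | c :: rest => if c = '\n' then '\n' :: pvStripA rest else pvLineA rest
  termination_by cs => cs.length
  decreasing_by all_goals (simp only [List.length_tail, List.length_cons]; omega)
  -- inner loop of the `/*` branch: skip until `*/`, emitting nothing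
  def pvBlockA : List Char → List Char
    | [] => []
    | c :: rest =>
      if c = '*' ∧ rest.head? = some '/' then pvStripA rest.tail else pvBlockA rest
  termination_by cs => cs.length
  decreasing_by all_goals (simp only [List.length_tail, List.length_cons]; omega)
  -- inner loop of the string/template branches (delimiter remembered)
  def pvStrA (delim : Char) : List Char → List Char
    | [] => []
    | c :: rest =>
      if h : c = '\\' ∧ rest ≠ [] then c :: rest.head h.2 :: pvStrA delim rest.tail
      else if c = delim then c :: pvStripA rest
      else c :: pvStrA delim rest
  termination_by cs => cs.length
  decreasing_by all_goals (simp only [List.length_tail, List.length_cons]; omega)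
end

def strip_js_comments (content : String) : String :=
  String.ofList (pvStripA content.toList)

-- ===== PORT B =====
-- Source B's single flat loop: state 0 = NORMAL, 1 = LINE comment, 2 = BLOCK comment,
-- 3 = STRING/TEMPLATE (with delim, escaped flag); star = 'previous block char was *'.
def pvLoopB (st : Nat) (delim : Char) (esc star : Bool) : List Char → List Char
  | [] => []
  | c :: rest =>
    if st = 0 then
      if c = '/' ∧ rest.head? = some '/' then pvLoopB 1 delim esc star rest.tail
      else if c = '/' ∧ rest.head? = some '*' then pvLoopB 2 delim esc false rest.tail
      else if c = '"' ∨ c = '\'' ∨ c = '`' then c :: pvLoopB 3 c false star rest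
      else c :: pvLoopB 0 delim esc star rest
    else if st = 1 then
      if c = '\n' then '\n' :: pvLoopB 0 delim esc star rest else pvLoopB 1 delim esc star rest
    else if st = 2 then
      if c = '/' ∧ star then pvLoopB 0 delim esc star rest
      else pvLoopB 2 delim esc (c = '*') rest
    else
      if esc then c :: pvLoopB 3 delim false star rest
      else if c = '\\' then c :: pvLoopB 3 delim true star rest
      else if c = delim then c :: pvLoopB 0 delim esc star rest
      else c :: pvLoopB 3 delim esc star rest
termination_by cs => cs.length
decreasing_by all_goals (simp only [List.length_tail, List.length_cons]; omega)

def strip_js_comments_alt (content : String) : String :=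
  String.ofList (pvLoopB 0 ' ' false false content.toList)

-- ===== PRECONDITION & SPEC =====
def Spec_strip_js_comments (content : String) (out : String) : Prop := out = strip_js_comments_alt content
instance (content : String) (out : String) : Decidable (Spec_strip_js_comments content out) := by unfold Spec_strip_js_comments; infer_instance

-- ===== CLAIM (what is proved, stated in full; the proofs are below) =====
def Claim_equal_strip_js_comments : Prop := ∀ (content : String), Dom_strip_js_comments content → Spec_strip_js_comments content (strip_js_comments content)

-- ===== LEMMAS AND PROOFS =====


theorem pvLoopB_nil (st : Nat) (d : Char) (e s : Bool) : pvLoopB st d e s [] = [] := by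
  rw [pvLoopB]

theorem pvLoopB0_cons (d : Char) (e s : Bool) (c : Char) (rest : List Char) :
    pvLoopB 0 d e s (c :: rest) =
      if c = '/' ∧ rest.head? = some '/' then pvLoopB 1 d e s rest.tail
      else if c = '/' ∧ rest.head? = some '*' then pvLoopB 2 d e false rest.tail
      else if c = '"' ∨ c = '\'' ∨ c = '`' then c :: pvLoopB 3 c false s rest
      else c :: pvLoopB 0 d e s rest := by
  rw [pvLoopB]; simp

theorem pvLoopB1_cons (d : Char) (e s : Bool) (c : Char) (rest : List Char) :
    pvLoopB 1 d e s (c :: rest) =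
      if c = '\n' then '\n' :: pvLoopB 0 d e s rest else pvLoopB 1 d e s rest := by
  rw [pvLoopB]; simp

theorem pvLoopB2_cons (d : Char) (e star : Bool) (c : Char) (rest : List Char) :
    pvLoopB 2 d e star (c :: rest) =
      if c = '/' ∧ star = true then pvLoopB 0 d e star rest
      else pvLoopB 2 d e (decide (c = '*')) rest := by
  rw [pvLoopB]; simp

theorem pvLoopB3_cons (dl : Char) (esc s : Bool) (c : Char) (rest : List Char) :
    pvLoopB 3 dl esc s (c :: rest) =
      if esc = true then c :: pvLoopB 3 dl false s rest
      else if c = '\\' then c :: pvLoopB 3 dl true s rest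
      else if c = dl then c :: pvLoopB 0 dl esc s rest
      else c :: pvLoopB 3 dl esc s rest := by
  rw [pvLoopB]; simp

theorem pv_main : ∀ (n : Nat) (cs : List Char), cs.length < n → ∀ (d : Char) (e s : Bool),
    pvStripA cs = pvLoopB 0 d e s cs ∧
    pvLineA cs = pvLoopB 1 d e s cs ∧
    pvBlockA cs = pvLoopB 2 d e false cs ∧
    pvBlockA ('*' :: cs) = pvLoopB 2 d e true cs ∧
    (∀ dl, pvStrA dl cs = pvLoopB 3 dl false s cs) ∧
    (∀ dl, pvLoopB 3 dl true s cs =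
      (match cs with | [] => [] | c :: rest => c :: pvStrA dl rest)) := by
  intro n
  induction n with
  | zero => intro cs h; exact absurd h (Nat.not_lt_zero _)
  | succ m ih =>
    intro cs hlen d e s
    cases cs with
    | nil =>
      refine ⟨?_, ?_, ?_, ?_, ?_, ?_⟩ <;>
        simp [pvStripA, pvLineA, pvBlockA, pvStrA, pvLoopB_nil]
    | cons c rest =>
      have hr : rest.length < m := by
        simp only [List.length_cons] at hlen; omega
      have hrt : rest.tail.length < m := by
        have : rest.tail.length = rest.length - 1 := List.length_tail
        omega
      refine ⟨?_, ?_, ?_, ?_, ?_, ?_⟩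
      · -- NORMAL
        rw [pvStripA, pvLoopB0_cons]
        by_cases h1 : c = '/' ∧ rest.head? = some '/'
        · rw [if_pos h1, if_pos h1]
          exact (ih rest.tail hrt d e s).2.1
        · rw [if_neg h1, if_neg h1]
          by_cases h2 : c = '/' ∧ rest.head? = some '*'
          · rw [if_pos h2, if_pos h2]
            exact (ih rest.tail hrt d e false).2.2.1
          · rw [if_neg h2, if_neg h2]
            by_cases h3 : c = '"' ∨ c = '\''
            · have h3' : c = '"' ∨ c = '\'' ∨ c = '`' := by tauto
              rw [if_pos h3, if_pos h3']
              exact congrArg (List.cons c) ((ih rest hr d e s).2.2.2.2.1 c)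
            · rw [if_neg h3]
              by_cases h4 : c = '`'
              · have h3' : c = '"' ∨ c = '\'' ∨ c = '`' := by tauto
                rw [if_pos h4, if_pos h3', h4]
                exact congrArg (List.cons '`') ((ih rest hr d e s).2.2.2.2.1 '`')
              · have h3' : ¬ (c = '"' ∨ c = '\'' ∨ c = '`') := by tauto
                rw [if_neg h4, if_neg h3']
                exact congrArg (List.cons c) (ih rest hr d e s).1
      · -- LINE comment
        rw [pvLineA, pvLoopB1_cons]
        by_cases h : c = '\n'
        · rw [if_pos h, if_pos h]
          exact congrArg (List.cons '\n') (ih rest hr d e s).1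
        · rw [if_neg h, if_neg h]
          exact (ih rest hr d e s).2.1
      · -- BLOCK comment, star = false
        rw [pvLoopB2_cons, if_neg (by simp)]
        by_cases hc : c = '*'
        · subst hc
          rw [show decide ('*' = '*') = true from by decide]
          exact (ih rest hr d e s).2.2.2.1
        · rw [show decide (c = '*') = false from by simp [hc], pvBlockA,
            if_neg (fun h => hc h.1)]
          exact (ih rest hr d e false).2.2.1
      · -- BLOCK comment, star = true
        rw [pvBlockA, pvLoopB2_cons]
        simp only [List.head?_cons, List.tail_cons, Option.some.injEq, true_and, and_true]
        by_cases hc : c = '/'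
        · rw [if_pos hc, if_pos hc]
          exact (ih rest hr d e true).1
        · rw [if_neg hc, if_neg hc]
          by_cases hs : c = '*'
          · subst hs
            rw [show decide ('*' = '*') = true from by decide]
            exact (ih rest hr d e s).2.2.2.1
          · rw [show decide (c = '*') = false from by simp [hs], pvBlockA,
              if_neg (fun h => hs h.1)]
            exact (ih rest hr d e false).2.2.1
      · -- STRING/TEMPLATE, esc = false
        intro dl
        rw [pvStrA, pvLoopB3_cons, if_neg (show ¬(false = true) by decide)]
        by_cases h : c = '\\' ∧ rest ≠ []
        · rw [dif_pos h, if_pos h.1]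
          obtain ⟨hc, hne⟩ := h
          cases rest with
          | nil => exact absurd rfl hne
          | cons r1 rest2 =>
            have hr2 : rest2.length < m := by
              simp only [List.length_cons] at hr; omega
            rw [pvLoopB3_cons, if_pos rfl]
            simp only [List.head_cons, List.tail_cons]
            exact congrArg (List.cons c)
              (congrArg (List.cons r1) ((ih rest2 hr2 d e s).2.2.2.2.1 dl))
        · rw [dif_neg h]
          by_cases hc : c = '\\'
          · have hne : rest = [] := by
              by_cases h' : rest = []
              · exact h'
              · exact absurd ⟨hc, h'⟩ h
            subst hc; subst hne
            rw [if_pos rfl, pvLoopB_nil]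
            by_cases hd : '\\' = dl
            · rw [if_pos hd]
              simp [pvStripA]
            · rw [if_neg hd]
              simp [pvStrA]
          · rw [if_neg hc]
            by_cases hd : c = dl
            · rw [if_pos hd, if_pos hd]
              exact congrArg (List.cons c) (ih rest hr dl false s).1
            · rw [if_neg hd, if_neg hd]
              exact congrArg (List.cons c) ((ih rest hr d e s).2.2.2.2.1 dl)
      · -- STRING/TEMPLATE, esc = true
        intro dl
        rw [pvLoopB3_cons, if_pos rfl]
        exact congrArg (List.cons c) (((ih rest hr d e s).2.2.2.2.1 dl).symm)

-- ===== VERDICT (by name: the statement is the Claim_ definition above) =====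
theorem strip_js_comments_spec : Claim_equal_strip_js_comments := by
  intro content _
  unfold Spec_strip_js_comments strip_js_comments strip_js_comments_alt
  exact congrArg String.ofList
    ((pv_main (content.toList.length + 1) content.toList (Nat.lt_succ_self _) ' ' false false).1)
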